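-- pv_equiv track=rewrite | github.com/StefanoAzzone/calendar_auto | lib/backend.py | get_week_beginning_and_end
-- ===== SOURCE A (Python) =====
-- def get_week_beginning_and_end(week):
--     beginning = -1
--     end = -1
--     i = 0
--     for day in week:
--         if day != 0:
--             beginning = day
--             break
--
--     counter = -1
--     while True:
--         if week[counter] != 0:
--             end = week[counter]
--             break
--         counter = counter - 1
--
--     return beginning, end
-- ===== SOURCE B (Python) =====
-- def get_week_beginning_and_end(week):
--     nz = [d for d in week if d != 0]
--     return nz[0], nz[-1]
-- ===== Notes on version B (the rewrite author's own statement) =====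
-- stated objective: simpler
-- what changed: Replaces A's two opposite-direction early-exit scans (a for/break forward scan and a while-True negative-index backward scan) with a single filter pass materializing the non-zero days, then two O(1) endpoint reads nz[0] and nz[-1].
import Mathlib
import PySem

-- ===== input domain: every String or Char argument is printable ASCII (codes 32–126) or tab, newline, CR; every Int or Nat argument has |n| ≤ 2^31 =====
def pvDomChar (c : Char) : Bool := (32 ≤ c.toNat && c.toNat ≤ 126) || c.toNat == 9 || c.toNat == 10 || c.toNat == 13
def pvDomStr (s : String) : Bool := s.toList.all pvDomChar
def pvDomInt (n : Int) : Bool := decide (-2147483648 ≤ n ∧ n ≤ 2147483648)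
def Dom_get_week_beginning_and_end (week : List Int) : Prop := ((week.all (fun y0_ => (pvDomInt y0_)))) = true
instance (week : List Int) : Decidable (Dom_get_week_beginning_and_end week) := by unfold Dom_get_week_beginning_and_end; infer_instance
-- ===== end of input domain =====

-- B replaces A's two opposite-direction early-exit scans with one filter pass and two endpoint reads (objective: simpler).

-- ===== PORT A =====
-- for day in week: if day != 0: beginning = day; break   (beginning stays -1 if no break)
def pvFirstNZ : List Int → Int
  | [] => -1
  | d :: t => if d ≠ 0 then d else pvFirstNZ t

-- while True: if week[counter] != 0: end = week[counter]; break; counter -= 1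
-- fuel = week.length suffices under Pre_; fuel 0 / index out of range = Python's IndexError (excluded by Pre_)
def pvEndLoop (week : List Int) : Nat → Int → Int
  | 0, _ => 0
  | fuel + 1, counter =>
    match PySem.List.pyGet? week counter with
    | none => 0
    | some v => if v ≠ 0 then v else pvEndLoop week fuel (counter - 1)

def get_week_beginning_and_end (week : List Int) : Int × Int :=
  (pvFirstNZ week, pvEndLoop week week.length (-1))

-- ===== PORT B =====
-- nz = [d for d in week if d != 0]; return nz[0], nz[-1]
def get_week_beginning_and_end_alt (week : List Int) : Int × Int :=
  let nz := week.filter (fun d => d != 0)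
  ((PySem.List.pyGet? nz 0).getD 0, (PySem.List.pyGet? nz (-1)).getD 0)

-- ===== PRECONDITION & SPEC =====
-- A raises IndexError (backward loop runs off the front) whenever week has no non-zero entry
-- (including the empty week); B raises IndexError (nz[0]) there too. Pre_ excludes exactly those.
def Pre_get_week_beginning_and_end (week : List Int) : Prop := ∃ d ∈ week, d ≠ 0
instance (week : List Int) : Decidable (Pre_get_week_beginning_and_end week) := by unfold Pre_get_week_beginning_and_end; infer_instance
def pvWitness_get_week_beginning_and_end : List Int := [0, 3, 0, 5, 0]

def Spec_get_week_beginning_and_end (week : List Int) (out : Int × Int) : Prop := out = get_week_beginning_and_end_alt week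
instance (week : List Int) (out : Int × Int) : Decidable (Spec_get_week_beginning_and_end week out) := by unfold Spec_get_week_beginning_and_end; infer_instance

-- ===== CLAIM (what is proved, stated in full; the proofs are below) =====
def Claim_equal_get_week_beginning_and_end : Prop := ∀ (week : List Int), Dom_get_week_beginning_and_end week → Pre_get_week_beginning_and_end week → Spec_get_week_beginning_and_end week (get_week_beginning_and_end week)

-- ===== LEMMAS AND PROOFS =====

theorem pvFilter_ne_nil {week : List Int} (h : ∃ d ∈ week, d ≠ 0) :
    week.filter (fun d => d != 0) ≠ [] := by
  obtain ⟨d, hd, hne⟩ := h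
  intro hnil
  have : d ∈ week.filter (fun d => d != 0) := by
    simp [List.mem_filter, hd, hne]
  simp [hnil] at this

theorem pvFirstNZ_eq (week : List Int) (h : week.filter (fun d => d != 0) ≠ []) :
    pvFirstNZ week = (PySem.List.pyGet? (week.filter (fun d => d != 0)) 0).getD 0 := by
  induction week with
  | nil => simp at h
  | cons d t ih =>
    by_cases hd : d = 0
    · subst hd
      simpa [pvFirstNZ, List.filter] using ih (by simpa [List.filter] using h)
    · rw [List.filter_cons_of_pos (by simp [hd])]
      simp [pvFirstNZ, hd]

-- dropping a trailing zero shifts the backward scan's negative index by one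
theorem pvEndLoop_shift (fuel : Nat) (ys : List Int) (c : Int) (hc : c ≤ -1) :
    pvEndLoop (ys ++ [0]) fuel (c - 1) = pvEndLoop ys fuel c := by
  induction fuel generalizing c with
  | zero => rfl
  | succ n ih =>
    have hget : PySem.List.pyGet? (ys ++ [(0 : Int)]) (c - 1) = PySem.List.pyGet? ys c := by
      by_cases hk : -(ys.length : Int) ≤ c
      · -- both in range: index len + c < len
        have h1 : PySem.List.pyGet? ys c = ys[((ys.length : Int) + c).toNat]? := by
          have := PySem.List.pyGet?_neg_natCast (xs := ys) (k := (-c).toNat)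
            (by omega) (by omega)
          have hc' : -(((-c).toNat : Int)) = c := by omega
          rw [hc'] at this
          rw [this]
          congr 1
          omega
        have h2 : PySem.List.pyGet? (ys ++ [(0:Int)]) (c - 1)
            = (ys ++ [(0:Int)])[(((ys ++ [(0:Int)]).length : Int) + (c - 1)).toNat]? := by
          have := PySem.List.pyGet?_neg_natCast (xs := ys ++ [(0:Int)]) (k := (-(c-1)).toNat)
            (by omega) (by simp only [List.length_append, List.length_cons, List.length_nil]; omega)
          have hc' : -(((-(c-1)).toNat : Int)) = c - 1 := by omega
          rw [hc'] at this
          rw [this]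
          congr 1
          simp only [List.length_append, List.length_cons, List.length_nil]
          omega
        rw [h1, h2]
        have hlt : (((ys ++ [(0:Int)]).length : Int) + (c - 1)).toNat < ys.length := by
          simp only [List.length_append, List.length_cons, List.length_nil]; omega
        have heq : (((ys ++ [(0:Int)]).length : Int) + (c - 1)).toNat
            = ((ys.length : Int) + c).toNat := by simp only [List.length_append, List.length_cons, List.length_nil]; omega
        rw [heq]
        exact List.getElem?_append_left (by omega)
      · -- both out of range
        have h1 : PySem.List.pyGet? ys c = none := by
          rw [PySem.List.pyGet?_eq_none_iff]
          simp [PySem.Raise.InRange]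
          omega
        have h2 : PySem.List.pyGet? (ys ++ [(0:Int)]) (c - 1) = none := by
          rw [PySem.List.pyGet?_eq_none_iff]
          simp [PySem.Raise.InRange]
          omega
        rw [h1, h2]
    simp only [pvEndLoop, hget]
    cases hv : PySem.List.pyGet? ys c with
    | none => rfl
    | some v =>
      by_cases hvz : v = 0
      · simp [hvz]
        have : c - 1 - 1 = (c - 1) - 1 := rfl
        exact ih (c - 1) (by omega)
      · simp [hvz]

theorem pvEndLoop_eq (week : List Int) (h : week.filter (fun d => d != 0) ≠ []) :
    pvEndLoop week week.length (-1)
      = ((week.filter (fun d => d != 0)).getLast?).getD 0 := by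
  induction week using List.reverseRecOn with
  | nil => simp at h
  | append_singleton ys d ih =>
    by_cases hd : d = 0
    · subst hd
      have hfil : (ys ++ [(0:Int)]).filter (fun d => d != 0) = ys.filter (fun d => d != 0) := by
        simp [List.filter_append]
      rw [hfil]
      have h' : ys.filter (fun d => d != 0) ≠ [] := by rw [← hfil]; exact h
      have hlen : (ys ++ [(0:Int)]).length = ys.length + 1 := by simp
      rw [hlen]
      have hget : PySem.List.pyGet? (ys ++ [(0:Int)]) (-1) = some 0 :=
        PySem.List.pyGet?_neg_one_append_singleton ys 0
      simp only [pvEndLoop, hget]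
      simp only [if_neg (by simp : ¬ ((0:Int) ≠ 0))]
      have := pvEndLoop_shift ys.length ys (-1) (by omega)
      simpa using (this.trans (ih h'))
    · have hget : PySem.List.pyGet? (ys ++ [d]) (-1) = some d :=
        PySem.List.pyGet?_neg_one_append_singleton ys d
      have hlen : (ys ++ [d]).length = ys.length + 1 := by simp
      rw [hlen]
      simp only [pvEndLoop, hget, if_pos hd]
      rw [List.filter_append]
      simp [hd]

-- ===== VERDICT (by name: the statement is the Claim_ definition above) =====
theorem get_week_beginning_and_end_spec : Claim_equal_get_week_beginning_and_end := by
  intro week _ hpre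
  have hnz := pvFilter_ne_nil hpre
  unfold Spec_get_week_beginning_and_end get_week_beginning_and_end get_week_beginning_and_end_alt
  simp only []
  refine Prod.ext ?_ ?_
  · simpa using pvFirstNZ_eq week hnz
  · have := pvEndLoop_eq week hnz
    simpa [PySem.List.pyGet?_neg_one] using this
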